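-- pv_equiv track=rewrite | github.com/onecoolx/AuraCompiler | tests/test_stringize_properties.py | _is_valid_c_string_literal
-- ===== SOURCE A (Python) =====
-- def _is_valid_c_string_literal(s: str) -> bool:
--     """Check if s is a syntactically valid C string literal.
--
--     Must start and end with unescaped double-quotes, and contain no
--     unescaped double-quotes, tabs, or newlines inside.
--     """
--     if len(s) < 2 or s[0] != '"' or s[-1] != '"':
--         return False
--     inner = s[1:-1]
--     i = 0
--     while i < len(inner):
--         ch = inner[i]
--         if ch == '"':
--             return False  # unescaped quote inside
--         if ch == '\t' or ch == '\n':
--             return False  # unescaped tab/newline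
--         if ch == '\\':
--             i += 2  # skip escape sequence
--             continue
--         i += 1
--     return True
-- ===== SOURCE B (Python) =====
-- def _is_valid_c_string_literal(s: str) -> bool:
--     if len(s) < 2 or s[0] != '"' or s[-1] != '"':
--         return False
--
--     def has_bad(seg):
--         return any(c in '"\t\n' for c in seg)
--
--     def check(segs):
--         # each segment in segs was preceded by a backslash in the source
--         if not segs:
--             return True
--         seg, rest = segs[0], segs[1:]
--         if seg == "":
--             # the backslash escaped another backslash (or was a trailing lone one)
--             if not rest:
--                 return True
--             return (not has_bad(rest[0])) and check(rest[1:])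
--         # the backslash escaped seg[0]; the remainder must be clean
--         return (not has_bad(seg[1:])) and check(rest)
--
--     segs = s[1:-1].split('\\')
--     return (not has_bad(segs[0])) and check(segs[1:])
-- ===== Notes on version B (the rewrite author's own statement) =====
-- stated objective: alternative
-- what changed: Instead of a character-by-character scan with an index jump for escapes, B splits the inner text on backslashes once and validates the resulting segments recursively (the first char of each later segment is the escaped char; an empty segment means an escaped backslash), with no per-character escape state.
import Mathlib
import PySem

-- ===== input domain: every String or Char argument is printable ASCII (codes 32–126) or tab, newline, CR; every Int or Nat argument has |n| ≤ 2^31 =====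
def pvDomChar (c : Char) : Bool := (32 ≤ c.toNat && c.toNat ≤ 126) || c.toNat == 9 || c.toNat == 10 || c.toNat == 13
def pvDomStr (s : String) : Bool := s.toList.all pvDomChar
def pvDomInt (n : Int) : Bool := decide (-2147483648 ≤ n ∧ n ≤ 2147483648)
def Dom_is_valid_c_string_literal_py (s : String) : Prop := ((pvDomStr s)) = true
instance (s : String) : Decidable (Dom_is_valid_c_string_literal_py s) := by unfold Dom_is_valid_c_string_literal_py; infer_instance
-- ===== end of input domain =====

-- B replaces A's per-character scan with an escape index-jump by a one-time split of the
-- inner text on backslashes followed by a recursive validation of the segments (alternative).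

-- ===== PORT A =====
-- the while-loop: index i advances by 2 after a backslash, by 1 otherwise
def pvLoopA (inner : List Char) (i : Nat) : Bool :=
  if h : i < inner.length then
    let ch := inner[i]
    if ch = '"' then false
    else if ch = '\t' ∨ ch = '\n' then false
    else if ch = '\\' then pvLoopA inner (i + 2)
    else pvLoopA inner (i + 1)
  else true
termination_by inner.length - i

def is_valid_c_string_literal_py (s : String) : Bool :=
  let cs := s.toList
  if cs.length < 2 ∨ PySem.List.pyGet? cs 0 ≠ some '"' ∨ PySem.List.pyGet? cs (-1) ≠ some '"' then
    false
  else
    pvLoopA (PySem.List.slice cs (some 1) (some (-1))) 0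

-- ===== PORT B =====
-- has_bad(seg): any(c in '"\t\n' for c in seg)
def pvHasBad (seg : List Char) : Bool :=
  seg.any (fun c => c = '"' ∨ c = '\t' ∨ c = '\n')

-- hand port of str.split('\\') (exact: the separator is a single character,
-- so Python's split is this simple structural recursion; always nonempty)
def pvSplitBS : List Char → List (List Char)
  | [] => [[]]
  | c :: rest =>
    if c = '\\' then [] :: pvSplitBS rest
    else
      match pvSplitBS rest with
      | [] => [[c]]            -- unreachable: pvSplitBS never returns []
      | h :: t => (c :: h) :: t

-- check(segs): each segment was preceded by a backslash
def pvCheckSegs : List (List Char) → Bool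
  | [] => true
  | [] :: [] => true
  | [] :: nxt :: rest => !pvHasBad nxt && pvCheckSegs rest
  | (_ :: segTail) :: rest => !pvHasBad segTail && pvCheckSegs rest

def is_valid_c_string_literal_py_alt (s : String) : Bool :=
  let cs := s.toList
  if cs.length < 2 ∨ PySem.List.pyGet? cs 0 ≠ some '"' ∨ PySem.List.pyGet? cs (-1) ≠ some '"' then
    false
  else
    match pvSplitBS (PySem.List.slice cs (some 1) (some (-1))) with
    | [] => true               -- unreachable
    | seg0 :: rest => !pvHasBad seg0 && pvCheckSegs rest

-- ===== PRECONDITION & SPEC =====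
def Spec_is_valid_c_string_literal_py (s : String) (out : Bool) : Prop := out = is_valid_c_string_literal_py_alt s
instance (s : String) (out : Bool) : Decidable (Spec_is_valid_c_string_literal_py s out) := by unfold Spec_is_valid_c_string_literal_py; infer_instance

-- ===== CLAIM (what is proved, stated in full; the proofs are below) =====
def Claim_equal_is_valid_c_string_literal_py : Prop := ∀ (s : String), Dom_is_valid_c_string_literal_py s → Spec_is_valid_c_string_literal_py s (is_valid_c_string_literal_py s)

-- ===== LEMMAS AND PROOFS =====
-- proof-side intermediate: the escape-flag scan; A's index loop and B's split-based
-- check are each related to it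
def pvLoopF : List Char → Bool → Bool
  | [], _ => true
  | ch :: rest, escaped =>
    if escaped then pvLoopF rest false
    else if ch = '\\' then pvLoopF rest true
    else if ch = '"' ∨ ch = '\t' ∨ ch = '\n' then false
    else pvLoopF rest false

theorem pvLoopF_true (l : List Char) : pvLoopF l true = pvLoopF (l.drop 1) false := by
  cases l <;> simp [pvLoopF]

theorem pvLoopA_eq_pvLoopF (inner : List Char) (i : Nat) :
    pvLoopA inner i = pvLoopF (inner.drop i) false := by
  induction hn : inner.length - i using Nat.strong_induction_on generalizing i with
  | _ n ih =>
    unfold pvLoopA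
    by_cases h : i < inner.length
    · have hdrop : inner.drop i = inner[i] :: inner.drop (i + 1) :=
        List.drop_eq_getElem_cons h
      simp only [h, dif_pos]
      by_cases hq : inner[i] = '"'
      · simp [hdrop, hq, pvLoopF]
      · by_cases ht : inner[i] = '\t' ∨ inner[i] = '\n'
        · rcases ht with ht | ht <;> simp [hdrop, ht, pvLoopF]
        · by_cases hb : inner[i] = '\\'
          · rw [if_neg hq, if_neg ht, if_pos hb,
              ih (inner.length - (i + 2)) (by omega) (i + 2) rfl]
            rw [hdrop]
            simp only [pvLoopF, hb, if_neg Bool.false_ne_true]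
            rw [pvLoopF_true, List.drop_drop]
            simp
          · rw [if_neg hq, if_neg ht, if_neg hb,
              ih (inner.length - (i + 1)) (by omega) (i + 1) rfl]
            rw [hdrop]
            have hq' : ¬ (inner[i] = '"' ∨ inner[i] = '\t' ∨ inner[i] = '\n') := by
              tauto
            simp [pvLoopF, hb, hq']
    · rw [dif_neg h]
      rw [List.drop_of_length_le (by omega)]
      rfl

theorem pvSplitBS_ne_nil (l : List Char) : pvSplitBS l ≠ [] := by
  cases l with
  | nil => simp [pvSplitBS]
  | cons c rest =>
    simp only [pvSplitBS]
    split
    · simp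
    · cases h : pvSplitBS rest <;> simp

-- the flag scan equals the split-based check (both forms of the flag, simultaneously)
theorem pvLoopF_eq_split (l : List Char) :
    (∀ seg0 rest, pvSplitBS l = seg0 :: rest →
        pvLoopF l false = (!pvHasBad seg0 && pvCheckSegs rest)) ∧
    pvLoopF l true = pvCheckSegs (pvSplitBS l) := by
  induction l with
  | nil =>
    refine ⟨fun seg0 rest h => ?_, by simp [pvLoopF, pvSplitBS, pvCheckSegs]⟩
    simp [pvSplitBS] at h
    simp [h.1, h.2, pvLoopF, pvHasBad, pvCheckSegs]
  | cons c r ih =>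
    obtain ⟨ih1, ih2⟩ := ih
    constructor
    · intro seg0 rest h
      by_cases hb : c = '\\'
      · simp only [pvSplitBS, hb] at h
        obtain ⟨h0, hr⟩ := List.cons.inj h
        subst h0; subst hr
        simp only [pvLoopF, hb, if_neg Bool.false_ne_true, ih2]
        simp [pvHasBad]
      · cases hs : pvSplitBS r with
        | nil => exact absurd hs (pvSplitBS_ne_nil r)
        | cons h' t' =>
          simp only [pvSplitBS, hb, hs] at h
          obtain ⟨h0, hr⟩ := List.cons.inj h
          subst h0; subst hr
          by_cases hq : c = '"' ∨ c = '\t' ∨ c = '\n'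
          · have hbb : pvHasBad (c :: h') = true := by
              simp [pvHasBad]; tauto
            simp [pvLoopF, hb, hq, hbb]
          · have hbad : pvHasBad (c :: h') = pvHasBad h' := by
              simp [pvHasBad]; tauto
            simp only [pvLoopF, if_neg Bool.false_ne_true, if_neg hb, hq, if_false,
              hbad]
            exact ih1 h' t' hs
    · -- flag set: c is escaped, continue with flag clear
      simp only [pvLoopF]
      by_cases hb : c = '\\'
      · simp only [pvSplitBS, hb]
        cases hs : pvSplitBS r with
        | nil => exact absurd hs (pvSplitBS_ne_nil r)
        | cons h' t' =>
          simp [pvCheckSegs, ih1 h' t' hs]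
      · cases hs : pvSplitBS r with
        | nil => exact absurd hs (pvSplitBS_ne_nil r)
        | cons h' t' =>
          simp only [pvSplitBS, hb, hs]
          rw [ih1 h' t' hs]
          simp [pvCheckSegs]


-- ===== VERDICT (by name: the statement is the Claim_ definition above) =====
theorem is_valid_c_string_literal_py_spec : Claim_equal_is_valid_c_string_literal_py := by
  intro s _
  unfold Spec_is_valid_c_string_literal_py is_valid_c_string_literal_py is_valid_c_string_literal_py_alt
  by_cases h : s.toList.length < 2 ∨ PySem.List.pyGet? s.toList 0 ≠ some '"' ∨
      PySem.List.pyGet? s.toList (-1) ≠ some '"'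
  · simp only [h, if_pos]
  · simp only [h, if_neg, not_false_iff]
    set inner := PySem.List.slice s.toList (some 1) (some (-1)) with hin
    cases hs : pvSplitBS inner with
    | nil => exact absurd hs (pvSplitBS_ne_nil inner)
    | cons seg0 rest =>
      have := (pvLoopF_eq_split inner).1 seg0 rest hs
      rw [pvLoopA_eq_pvLoopF inner 0]
      simpa using this
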